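-- pv_equiv track=rewrite | github.com/jakobytes/runoregi | data.py | render_themes_tree
-- ===== SOURCE A (Python) =====
-- from operator import itemgetter
--
-- def render_themes_tree(themes):
--
--     def _themes_to_lines(themes):
--         lines = []
--         current = []
--         for theme_lst in themes:
--             # if the last element of a list is '*', it's a "minor" theme
--             # that will be specially marked in the UI
--             minor = False
--             if theme_lst[-1] == '*':
--                 minor = True
--                 theme_lst.pop()
--             for i, t in enumerate(theme_lst):
--                 if i >= len(current) or t != current[i]:
--                     pref = ['│'] * (i-1) + ['├'] * (i > 0)
--                     if i == len(theme_lst)-1: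
--                         # only the leaf node is marked as "minor"
--                         lines.append((i, pref, minor, t))
--                     else:
--                         lines.append((i, pref, False, t))
--                     current = current[:i] + [t]
--         return lines
--
--     def _fix_prefixes(lines):
--         # this removes the tree branches ("|") that lead nowhere
--         max_d = max(lines, key=itemgetter(0))[0]
--         for i in range(len(lines)-1, -1, -1):
--             d = lines[i][0]
--             next_d = lines[i+1][0] if i+1 < len(lines) else 0
--             if next_d < d:
--                 for j in range(next_d, d-1):
--                     lines[i][1][j] = ' '
--             if i+1 < len(lines):
--                 for j in range(d-1):
--                     if j < next_d and lines[i+1][1][j] == ' ':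
--                         lines[i][1][j] = ' '
--             if d > 0 and (d > next_d or lines[i+1][1][d-1] == ' '):
--                 lines[i][1][d-1] = '└'
--
--     lines = _themes_to_lines(themes)
--     _fix_prefixes(lines)
--     return lines
-- ===== SOURCE B (Python) =====
-- # Alternative decomposition: pass 1 folds each path against the previous "spine"
-- # using a common-prefix length, collecting plain (depth, minor, label) triples;
-- # pass 2 computes every line's prefix directly by a forward lookahead over the
-- # later triples, instead of A's backward in-place fixup pass.
-- # Like A, this pops a trailing '*' from the input lists in place.
--
-- def _open(triples, start, j):
--     # is the branch at column j still "open" below line start-1?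
--     for k in range(start, len(triples)):
--         d = triples[k][0]
--         if d == j + 1:
--             return True
--         if d <= j:
--             return False
--     return False
--
-- def render_themes_tree(themes):
--     triples = []
--     spine = []
--     for lst in themes:
--         minor = lst[-1] == '*'
--         if minor:
--             lst.pop()
--         k = 0
--         while k < len(lst) and k < len(spine) and lst[k] == spine[k]:
--             k += 1
--         if k < len(lst):
--             triples += [(i, minor and i == len(lst) - 1, lst[i])
--                         for i in range(k, len(lst))]
--             spine = lst[:]
--     out = []
--     for idx, (d, minor, label) in enumerate(triples):
--         pref = [('│' if _open(triples, idx + 1, j) else ' ') for j in range(d - 1)]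
--         if d > 0:
--             pref.append('├' if _open(triples, idx + 1, d - 1) else '└')
--         out.append((d, pref, minor, label))
--     return out
-- ===== Notes on version B (the rewrite author's own statement) =====
-- stated objective: alternative
-- what changed: B replaces A's per-element comparison against `current` by a common-prefix fold producing bare (depth, minor, label) triples, and replaces A's backward in-place prefix-fixup pass by a direct forward-lookahead computation of each line's prefix characters.
import Mathlib
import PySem

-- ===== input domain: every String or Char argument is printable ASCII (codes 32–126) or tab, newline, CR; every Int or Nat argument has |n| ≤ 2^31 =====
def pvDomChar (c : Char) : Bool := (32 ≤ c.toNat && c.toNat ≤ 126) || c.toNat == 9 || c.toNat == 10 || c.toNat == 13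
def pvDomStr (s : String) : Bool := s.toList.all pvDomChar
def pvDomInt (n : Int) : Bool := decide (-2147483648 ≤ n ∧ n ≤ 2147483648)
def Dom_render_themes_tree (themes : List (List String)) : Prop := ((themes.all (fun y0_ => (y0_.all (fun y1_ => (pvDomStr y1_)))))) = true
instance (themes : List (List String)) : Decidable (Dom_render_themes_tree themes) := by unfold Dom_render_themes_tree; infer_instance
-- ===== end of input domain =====

-- B replaces A's backward in-place prefix-fixup pass by a common-prefix fold producing bare
-- (depth, minor, label) triples plus a direct forward-lookahead prefix computation per line.
-- Both Pythons pop a trailing '*' from the inner input lists in place (identical mutation);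
-- the equivalence proved here is about the return value.

-- ===== PORT A =====
-- prefix as first constructed by A:  ['│'] * (i-1) + ['├'] * (i > 0)
def pvInitPref (i : Nat) : List String :=
  List.replicate (i - 1) "│" ++ List.replicate (if 0 < i then 1 else 0) "├"

-- the inner `for i, t in enumerate(theme_lst)` loop of `_themes_to_lines`
-- (depths are the nonnegative ints produced by enumerate; kept as Nat and cast to Int at the end)
def pvAInner (minor : Bool) (n : Nat) :
    Nat → List String → (List (Nat × List String × Bool × String) × List String) →
    (List (Nat × List String × Bool × String) × List String)
  | _, [], st => st
  | i, t :: ts, (lines, current) =>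
    pvAInner minor n (i + 1) ts
      (if i ≥ current.length ∨ t ≠ current.getD i "" then
        (lines ++ [(i, pvInitPref i, (if i = n - 1 then minor else false), t)],
         current.take i ++ [t])
       else (lines, current))

-- `_themes_to_lines`
def pvThemesToLines (themes : List (List String)) :
    List (Nat × List String × Bool × String) × List String :=
  themes.foldl (fun st lst =>
    -- theme_lst[-1] == '*' (on an empty inner list Python raises IndexError: excluded by Pre_)
    let minor := PySem.List.pyGet? lst (-1) == some "*"
    let lst' := if minor then lst.dropLast else lst      -- theme_lst.pop()
    pvAInner minor lst'.length 0 lst' st) ([], [])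

-- one backward step of `_fix_prefixes`: line i rewritten from the ALREADY-FIXED line i+1
def pvFixLine (cur : Nat × List String × Bool × String)
    (next? : Option (Nat × List String × Bool × String)) :
    Nat × List String × Bool × String :=
  let d := cur.1
  let next_d := match next? with | some nx => nx.1 | none => 0
  let p0 := cur.2.1
  let p1 := if next_d < d then
      (List.range' next_d (d - 1 - next_d)).foldl (fun p j => p.set j " ") p0
    else p0
  let p2 := match next? with
    | some nx =>
        (List.range (d - 1)).foldl
          (fun p j => if j < next_d ∧ nx.2.1.getD j "" = " " then p.set j " " else p) p1
    | none => p1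
  let p3 := if 0 < d ∧ (next_d < d ∨
        next?.any (fun nx => nx.2.1.getD (d - 1) "" == " ") = true) then
      p2.set (d - 1) "└"
    else p2
  (d, p3, cur.2.2)

-- the backward `for i in range(len(lines)-1, -1, -1)` loop: the tail is fixed first
def pvFixAll : List (Nat × List String × Bool × String) → List (Nat × List String × Bool × String)
  | [] => []
  | l :: rest =>
    let r := pvFixAll rest
    pvFixLine l r.head? :: r

def render_themes_tree (themes : List (List String)) : List (Int × List String × Bool × String) :=
  let lines := (pvThemesToLines themes).1
  -- Python computes `max_d = max(lines, ...)` but never uses it; its only effect is a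
  -- ValueError on empty `lines`, which Pre_ excludes.
  (pvFixAll lines).map (fun l => ((l.1 : Int), l.2))

-- ===== PORT B =====
-- `_open(rest, j)`: scan the later triples; column j is open if depth j+1 recurs before depth ≤ j
def pvOpen : List (Nat × Bool × String) → Nat → Bool
  | [], _ => false
  | (d, _, _) :: rest, j => if d = j + 1 then true else if d ≤ j then false else pvOpen rest j

-- the `while k < len(lst) and k < len(spine) and lst[k] == spine[k]: k += 1` loop
def pvCommonLen : List String → List String → Nat
  | s :: ss, l :: ls => if l == s then pvCommonLen ss ls + 1 else 0
  | _, _ => 0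

-- pass 1 of B: fold to plain (depth, minor, label) triples
def pvGenTriples (themes : List (List String)) : List (Nat × Bool × String) × List String :=
  themes.foldl (fun st lst =>
    let minor := PySem.List.pyGet? lst (-1) == some "*"
    let lst' := if minor then lst.dropLast else lst      -- lst.pop()
    let k := pvCommonLen st.2 lst'
    if k < lst'.length then
      (st.1 ++ (List.range' k (lst'.length - k)).map
          (fun i => (i, minor && (i == lst'.length - 1), lst'.getD i "")),
       lst')
    else st) ([], [])

-- the prefix of one line, computed directly from the lookahead
def pvDirectPref (d : Nat) (rest : List (Nat × Bool × String)) : List String :=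
  (List.range (d - 1)).map (fun j => if pvOpen rest j then "│" else " ")
    ++ (if 0 < d then [if pvOpen rest (d - 1) then "├" else "└"] else [])

-- pass 2 of B: each line from its own triple and the suffix of later triples
def pvRenderAll : List (Nat × Bool × String) → List (Nat × List String × Bool × String)
  | [] => []
  | (d, m, t) :: rest => (d, pvDirectPref d rest, m, t) :: pvRenderAll rest

def render_themes_tree_alt (themes : List (List String)) :
    List (Int × List String × Bool × String) :=
  (pvRenderAll (pvGenTriples themes).1).map (fun l => ((l.1 : Int), l.2))

-- ===== PRECONDITION & SPEC =====
-- Pre_ excludes exactly the inputs where Python A raises: an empty inner list (IndexError on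
-- theme_lst[-1]) and inputs whose every list is ['*'] — including the empty input — on which
-- `lines` stays empty and `max` raises ValueError.
def Pre_render_themes_tree (themes : List (List String)) : Prop :=
  (∀ l ∈ themes, l ≠ []) ∧ (∃ l ∈ themes, l ≠ ["*"])
instance (themes : List (List String)) : Decidable (Pre_render_themes_tree themes) := by
  unfold Pre_render_themes_tree; infer_instance

def pvWitness_render_themes_tree : List (List String) :=
  [["a", "b"], ["a", "c", "*"], ["d"]]

def Spec_render_themes_tree (themes : List (List String))
    (out : List (Int × List String × Bool × String)) : Prop :=
  out = render_themes_tree_alt themes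
instance (themes : List (List String)) (out : List (Int × List String × Bool × String)) :
    Decidable (Spec_render_themes_tree themes out) := by
  unfold Spec_render_themes_tree; infer_instance

-- ===== CLAIM (what is proved, stated in full; the proofs are below) =====
def Claim_equal_render_themes_tree : Prop :=
  ∀ (themes : List (List String)), Dom_render_themes_tree themes →
    Pre_render_themes_tree themes →
    Spec_render_themes_tree themes (render_themes_tree themes)

-- ===== LEMMAS AND PROOFS =====

-- a triple paired with the initial prefix A builds for it
def pvAddInit (x : Nat × Bool × String) : Nat × List String × Bool × String :=
  (x.1, pvInitPref x.1, x.2.1, x.2.2)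

-- the chain of lines A emits for the unmatched tail of a path, starting at depth i
def pvEmit (minor : Bool) (n : Nat) : Nat → List String → List (Nat × List String × Bool × String)
  | _, [] => []
  | i, t :: ts => (i, pvInitPref i, (if i = n - 1 then minor else false), t) :: pvEmit minor n (i + 1) ts

-- consecutive emitted depths rise by at most one
def pvStep (a b : Nat × Bool × String) : Prop := b.1 ≤ a.1 + 1

theorem pvAInner_emit (minor : Bool) (n : Nat) :
    ∀ (ts cur : List String) (lines : List (Nat × List String × Bool × String)),
    pvAInner minor n cur.length ts (lines, cur) =
      (lines ++ pvEmit minor n cur.length ts, cur ++ ts) := by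
  intro ts
  induction ts with
  | nil => intro cur lines; simp [pvAInner, pvEmit]
  | cons t ts ih =>
    intro cur lines
    simp only [pvAInner, pvEmit]
    rw [if_pos (Or.inl (le_refl _)), List.take_length]
    have h := ih (cur ++ [t]) (lines ++ [(cur.length, pvInitPref cur.length, (if cur.length = n - 1 then minor else false), t)])
    simp only [List.length_append, List.length_cons, List.length_nil] at h
    rw [h]
    simp [List.append_assoc]

theorem pvAInner_group (minor : Bool) (n : Nat) :
    ∀ (ts curs pre : List String) (lines : List (Nat × List String × Bool × String)),
    pvAInner minor n pre.length ts (lines, pre ++ curs) =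
      (if pvCommonLen curs ts < ts.length then
        (lines ++ pvEmit minor n (pre.length + pvCommonLen curs ts)
           (ts.drop (pvCommonLen curs ts)), pre ++ ts)
       else (lines, pre ++ curs)) := by
  intro ts
  induction ts with
  | nil =>
    intro curs pre lines
    have h0 : pvCommonLen curs [] = 0 := by cases curs <;> rfl
    simp [pvAInner, h0]
  | cons t ts ih =>
    intro curs pre lines
    match curs with
    | [] =>
      have hk : pvCommonLen [] (t :: ts) = 0 := rfl
      simp only [pvAInner, hk, List.append_nil]
      rw [if_pos (Or.inl (le_refl _)), List.take_length]
      have h := pvAInner_emit minor n ts (pre ++ [t]) (lines ++ [(pre.length, pvInitPref pre.length, (if pre.length = n - 1 then minor else false), t)])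
      simp only [List.length_append, List.length_cons, List.length_nil] at h
      rw [h]
      rw [if_pos (show 0 < (t :: ts).length by simp)]
      simp [pvEmit, List.append_assoc]
    | c :: curs' =>
      by_cases hc : t = c
      · subst hc
        have hk : pvCommonLen (t :: curs') (t :: ts) = pvCommonLen curs' ts + 1 := by
          simp [pvCommonLen]
        have hlen : ¬ (pre.length ≥ (pre ++ t :: curs').length) := by simp
        have hget : (pre ++ t :: curs').getD pre.length "" = t := by
          simp [List.getD_eq_getElem?_getD]
        simp only [pvAInner, hlen, hget, ne_eq, not_true_eq_false, or_self, if_neg,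
          not_false_eq_true]
        have hpre : pre ++ t :: curs' = (pre ++ [t]) ++ curs' := by simp
        have hlen1 : pre.length + 1 = (pre ++ [t]).length := by simp
        rw [hpre, hlen1, ih curs' (pre ++ [t]) lines]
        rw [hk]
        by_cases hlt : pvCommonLen curs' ts < ts.length
        · rw [if_pos hlt, if_pos (by simpa using Nat.succ_lt_succ hlt)]
          simp [List.append_assoc, Nat.add_assoc, Nat.add_comm 1]
        · rw [if_neg hlt, if_neg (by simpa using fun h => hlt (Nat.lt_of_succ_lt_succ h))]
      · have hk : pvCommonLen (c :: curs') (t :: ts) = 0 := by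
          simp [pvCommonLen, hc]
        have hget : (pre ++ c :: curs').getD pre.length "" = c := by
          simp [List.getD_eq_getElem?_getD]
        simp only [pvAInner, hk, hget]
        rw [if_pos (Or.inr (by simpa using hc))]
        rw [List.take_append_of_le_length (le_refl _), List.take_length]
        have h := pvAInner_emit minor n ts (pre ++ [t]) (lines ++ [(pre.length, pvInitPref pre.length, (if pre.length = n - 1 then minor else false), t)])
        simp only [List.length_append, List.length_cons, List.length_nil] at h
        rw [h]
        rw [if_pos (show 0 < (t :: ts).length by simp)]
        simp [pvEmit, List.append_assoc]

theorem pvEmit_eq_map (minor : Bool) (n : Nat) :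
    ∀ (m k : Nat) (l : List String), m = l.length - k →
    pvEmit minor n k (l.drop k) =
      ((List.range' k m).map
        (fun i => (i, minor && (i == n - 1), l.getD i ""))).map pvAddInit := by
  intro m
  induction m with
  | zero =>
    intro k l hm
    have : l.drop k = [] := List.drop_eq_nil_iff.mpr (by omega)
    simp [this, pvEmit]
  | succ m ih =>
    intro k l hm
    have hk : k < l.length := by omega
    have hdrop : l.drop k = l[k] :: l.drop (k + 1) := List.drop_eq_getElem_cons hk
    rw [hdrop, List.range'_succ]
    simp only [List.map_cons, pvEmit]
    rw [ih (k + 1) l (by omega)]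
    congr 1
    simp [pvAddInit, List.getD_eq_getElem?_getD, hk]
    by_cases h : k = n - 1 <;> simp [h]

theorem pvGenAux :
    ∀ (themes : List (List String)) (triples : List (Nat × Bool × String)) (spine : List String),
    themes.foldl (fun st lst =>
      let minor := PySem.List.pyGet? lst (-1) == some "*"
      let lst' := if minor then lst.dropLast else lst
      pvAInner minor lst'.length 0 lst' st) (triples.map pvAddInit, spine) =
    (((themes.foldl (fun st lst =>
      let minor := PySem.List.pyGet? lst (-1) == some "*"
      let lst' := if minor then lst.dropLast else lst
      let k := pvCommonLen st.2 lst'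
      if k < lst'.length then
        (st.1 ++ (List.range' k (lst'.length - k)).map
            (fun i => (i, minor && (i == lst'.length - 1), lst'.getD i "")), lst')
      else st) (triples, spine))).1.map pvAddInit,
     ((themes.foldl (fun st lst =>
      let minor := PySem.List.pyGet? lst (-1) == some "*"
      let lst' := if minor then lst.dropLast else lst
      let k := pvCommonLen st.2 lst'
      if k < lst'.length then
        (st.1 ++ (List.range' k (lst'.length - k)).map
            (fun i => (i, minor && (i == lst'.length - 1), lst'.getD i "")), lst')
      else st) (triples, spine))).2) := by
  intro themes
  induction themes with
  | nil => intro triples spine; rfl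
  | cons lst themes ih =>
    intro triples spine
    rw [List.foldl_cons, List.foldl_cons]
    simp only []
    set minor := PySem.List.pyGet? lst (-1) == some "*" with hminor
    set lst' := if minor then lst.dropLast else lst with hlst'
    have hg := pvAInner_group minor lst'.length lst' spine [] (triples.map pvAddInit)
    simp only [List.length_nil, List.nil_append, Nat.zero_add] at hg
    rw [hg]
    by_cases hk : pvCommonLen spine lst' < lst'.length
    · rw [if_pos hk]
      rw [pvEmit_eq_map minor lst'.length (lst'.length - pvCommonLen spine lst')
            (pvCommonLen spine lst') lst' rfl]
      rw [← List.map_append]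
      rw [ih]
      rw [if_pos hk]
    · rw [if_neg hk, ih, if_neg hk]

theorem pvCommonLen_le : ∀ (a b : List String), pvCommonLen a b ≤ a.length := by
  intro a
  induction a with
  | nil => intro b; cases b <;> simp [pvCommonLen]
  | cons x xs ih =>
    intro b
    cases b with
    | nil => simp [pvCommonLen]
    | cons y ys =>
      simp only [pvCommonLen]
      by_cases h : y == x
      · rw [if_pos h]; simpa using ih ys
      · rw [if_neg h]; simp

theorem pvChainRange' : ∀ (m k : Nat), List.IsChain (fun a b : Nat => b ≤ a + 1) (List.range' k m) := by
  intro m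
  induction m with
  | zero => intro k; simp
  | succ m ih =>
    intro k
    rw [List.range'_succ]
    rw [List.isChain_cons]
    refine ⟨?_, ih (k + 1)⟩
    intro y hy
    cases m with
    | zero => simp at hy
    | succ m =>
      rw [List.range'_succ] at hy
      simp at hy
      omega

theorem pvGenChain' :
    ∀ (themes : List (List String)) (triples : List (Nat × Bool × String)) (spine : List String),
    List.IsChain pvStep triples →
    (∀ last ∈ triples.getLast?, spine.length = last.1 + 1) →
    List.IsChain pvStep ((themes.foldl (fun st lst =>
      let minor := PySem.List.pyGet? lst (-1) == some "*"
      let lst' := if minor then lst.dropLast else lst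
      let k := pvCommonLen st.2 lst'
      if k < lst'.length then
        (st.1 ++ (List.range' k (lst'.length - k)).map
            (fun i => (i, minor && (i == lst'.length - 1), lst'.getD i "")), lst')
      else st) (triples, spine))).1 ∧
    (∀ last ∈ ((themes.foldl (fun st lst =>
      let minor := PySem.List.pyGet? lst (-1) == some "*"
      let lst' := if minor then lst.dropLast else lst
      let k := pvCommonLen st.2 lst'
      if k < lst'.length then
        (st.1 ++ (List.range' k (lst'.length - k)).map
            (fun i => (i, minor && (i == lst'.length - 1), lst'.getD i "")), lst')
      else st) (triples, spine))).1.getLast?,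
      ((themes.foldl (fun st lst =>
      let minor := PySem.List.pyGet? lst (-1) == some "*"
      let lst' := if minor then lst.dropLast else lst
      let k := pvCommonLen st.2 lst'
      if k < lst'.length then
        (st.1 ++ (List.range' k (lst'.length - k)).map
            (fun i => (i, minor && (i == lst'.length - 1), lst'.getD i "")), lst')
      else st) (triples, spine))).2.length = last.1 + 1) := by
  intro themes
  induction themes with
  | nil => intro triples spine h1 h2; exact ⟨h1, h2⟩
  | cons lst themes ih =>
    intro triples spine h1 h2
    rw [List.foldl_cons]
    simp only []
    set minor := PySem.List.pyGet? lst (-1) == some "*" with hminor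
    set lst' := if minor then lst.dropLast else lst with hlst'
    set k := pvCommonLen spine lst' with hk
    by_cases hlt : k < lst'.length
    · rw [if_pos hlt]
      set g := (List.range' k (lst'.length - k)).map
          (fun i => (i, minor && (i == lst'.length - 1), lst'.getD i "")) with hg
      have hgchain : List.IsChain pvStep g := by
        rw [hg, List.isChain_map]
        have := pvChainRange' (lst'.length - k) k
        exact this.imp (fun a b hab => by simpa [pvStep] using hab)
      have hglast : g.getLast? = some (lst'.length - 1,
          minor && ((lst'.length - 1 : Nat) == lst'.length - 1), lst'.getD (lst'.length - 1) "") := by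
        rw [hg]
        have hm : lst'.length - k = (lst'.length - k - 1) + 1 := by omega
        rw [hm, List.range'_concat, List.map_append, List.getLast?_append, List.getLast?_map]
        simp only [Nat.one_mul]
        have : k + (lst'.length - k - 1) = lst'.length - 1 := by omega
        rw [this]
        rfl
      refine ih (triples ++ g) lst' ?_ ?_
      · refine h1.append hgchain ?_
        intro x hx y hy
        have hy' : y.1 = k := by
          rw [hg] at hy
          rcases m : lst'.length - k with _ | m'
          · omega
          · rw [m, List.range'_succ] at hy
            simp at hy
            rw [← hy]
        have hkle : k ≤ spine.length := pvCommonLen_le spine lst'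
        have := h2 x hx
        show y.1 ≤ x.1 + 1
        omega
      · intro last hlast
        rw [List.getLast?_append, hglast] at hlast
        simp at hlast
        rw [← hlast]
        show lst'.length = (lst'.length - 1) + 1
        omega
    · rw [if_neg hlt]
      exact ih triples spine h1 h2

theorem pvSetFold_length : ∀ (b a : Nat) (xs : List String),
    ((List.range' a b).foldl (fun p j => p.set j " ") xs).length = xs.length := by
  intro b
  induction b with
  | zero => intro a xs; rfl
  | succ b ih =>
    intro a xs
    rw [List.range'_succ, List.foldl_cons, ih]
    exact List.length_set ..

theorem pvSetFold_getElem? : ∀ (b a : Nat) (xs : List String) (i : Nat),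
    ((List.range' a b).foldl (fun p j => p.set j " ") xs)[i]? =
      if a ≤ i ∧ i < a + b ∧ i < xs.length then some " " else xs[i]? := by
  intro b
  induction b with
  | zero =>
    intro a xs i
    rw [show List.range' a 0 = [] from rfl, List.foldl_nil, if_neg (by omega)]
  | succ b ih =>
    intro a xs i
    rw [List.range'_succ, List.foldl_cons, ih, List.length_set, List.getElem?_set]
    by_cases hcond : a ≤ i ∧ i < a + (b + 1) ∧ i < xs.length
    · rw [if_pos hcond]
      by_cases h1 : a + 1 ≤ i ∧ i < a + 1 + b ∧ i < xs.length
      · rw [if_pos h1]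
      · rw [if_neg h1]
        have hia : a = i := by omega
        rw [if_pos hia, if_pos (by omega)]
    · rw [if_neg hcond, if_neg (show ¬(a + 1 ≤ i ∧ i < a + 1 + b ∧ i < xs.length) by omega)]
      by_cases hia : a = i
      · subst hia
        rw [if_pos rfl, if_neg (by omega), List.getElem?_eq_none (by omega)]
      · rw [if_neg hia]

theorem pvCopyFold_length (C : Nat → Prop) [DecidablePred C] : ∀ (m : Nat) (xs : List String),
    ((List.range m).foldl (fun p j => if C j then p.set j " " else p) xs).length = xs.length := by
  intro m
  induction m with
  | zero => intro xs; rfl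
  | succ m ih =>
    intro xs
    rw [List.range_succ, List.foldl_append, List.foldl_cons, List.foldl_nil]
    by_cases h : C m
    · rw [if_pos h, List.length_set, ih]
    · rw [if_neg h, ih]

theorem pvCopyFold_getElem? (C : Nat → Prop) [DecidablePred C] : ∀ (m : Nat) (xs : List String) (i : Nat),
    ((List.range m).foldl (fun p j => if C j then p.set j " " else p) xs)[i]? =
      if i < m ∧ C i ∧ i < xs.length then some " " else xs[i]? := by
  intro m
  induction m with
  | zero =>
    intro xs i
    rw [show List.range 0 = [] from rfl, List.foldl_nil, if_neg (by omega)]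
  | succ m ih =>
    intro xs i
    rw [List.range_succ, List.foldl_append, List.foldl_cons, List.foldl_nil]
    by_cases h : C m
    · rw [if_pos h, List.getElem?_set, pvCopyFold_length C, ih]
      by_cases h1 : m = i
      · subst h1
        by_cases h2 : m < xs.length
        · rw [if_pos rfl, if_pos h2, if_pos ⟨by omega, h, h2⟩]
        · rw [if_pos rfl, if_neg h2,
            if_neg (show ¬(m < m + 1 ∧ C m ∧ m < xs.length) from fun hc => h2 hc.2.2),
            List.getElem?_eq_none (by omega)]
      · rw [if_neg h1]
        by_cases h3 : i < m ∧ C i ∧ i < xs.length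
        · rw [if_pos h3, if_pos ⟨by omega, h3.2⟩]
        · rw [if_neg h3, if_neg (fun hc => h3 ⟨by omega, hc.2⟩)]
    · rw [if_neg h, ih]
      by_cases h3 : i < m ∧ C i ∧ i < xs.length
      · rw [if_pos h3, if_pos ⟨by omega, h3.2⟩]
      · rw [if_neg h3]
        by_cases h4 : i < m + 1 ∧ C i ∧ i < xs.length
        · exfalso
          rcases Nat.lt_or_ge i m with him | him
          · exact h3 ⟨him, h4.2⟩
          · have : i = m := by omega
            subst this
            exact h h4.2.1
        · rw [if_neg h4]

theorem pvInitPref_length (d : Nat) : (pvInitPref d).length = d := by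
  simp only [pvInitPref, List.length_append, List.length_replicate]
  split <;> omega

theorem pvInitPref_getElem? (d i : Nat) (h : i < d) :
    (pvInitPref d)[i]? = some (if i = d - 1 then "├" else "│") := by
  unfold pvInitPref
  rw [if_pos (by omega)]
  by_cases hi : i = d - 1
  · rw [if_pos hi]
    rw [List.getElem?_append_right (by simp; omega)]
    simp [hi]
  · rw [if_neg hi]
    rw [List.getElem?_append_left (by simp; omega)]
    simp [Nat.lt_of_lt_of_le (by omega : i < d - 1) (le_refl _)]

theorem pvDirectPref_length (d : Nat) (rest : List (Nat × Bool × String)) :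
    (pvDirectPref d rest).length = d := by
  simp only [pvDirectPref, List.length_append, List.length_map, List.length_range]
  split <;> simp <;> omega

theorem pvDirectPref_getElem? (d : Nat) (rest : List (Nat × Bool × String)) (i : Nat) (h : i < d) :
    (pvDirectPref d rest)[i]? =
      some (if i = d - 1 then (if pvOpen rest (d - 1) then "├" else "└")
            else (if pvOpen rest i then "│" else " ")) := by
  unfold pvDirectPref
  by_cases hi : i = d - 1
  · rw [if_pos hi, List.getElem?_append_right (by simp; omega)]
    rw [if_pos (by omega)]
    simp [hi]
  · rw [if_neg hi, List.getElem?_append_left (by simp; omega)]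
    simp [Nat.lt_of_lt_of_le (by omega : i < d - 1) (le_refl _)]

theorem pvDirectPref_getD (d : Nat) (rest : List (Nat × Bool × String)) (i : Nat) :
    (pvDirectPref d rest).getD i "" =
      if _h : i < d then
        (if i = d - 1 then (if pvOpen rest (d - 1) then "├" else "└")
         else (if pvOpen rest i then "│" else " "))
      else "" := by
  rw [List.getD_eq_getElem?_getD]
  by_cases h : i < d
  · rw [dif_pos h, pvDirectPref_getElem? d rest i h]; rfl
  · rw [dif_neg h, List.getElem?_eq_none (by rw [pvDirectPref_length]; omega)]; rfl

theorem pvFixLine_eq (d : Nat) (m : Bool) (t : String) (rest : List (Nat × Bool × String))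
    (hrel : ∀ y ∈ rest.head?, y.1 ≤ d + 1) :
    pvFixLine (d, pvInitPref d, m, t) (pvRenderAll rest).head? =
      (d, pvDirectPref d rest, m, t) := by
  rcases rest with _ | ⟨⟨d', m', t'⟩, r2⟩
  · simp only [pvRenderAll, pvFixLine, List.head?_nil, Option.any_none, Bool.false_eq_true,
      or_false, Prod.mk.injEq, true_and, and_true]
    by_cases hd : 0 < d
    · rw [if_pos hd, if_pos ⟨hd, hd⟩]
      have hlen : ((List.range' 0 (d - 1 - 0)).foldl (fun p j => p.set j " ")
          (pvInitPref d)).length = d := by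
        rw [pvSetFold_length, pvInitPref_length]
      refine List.ext_getElem? (fun i => ?_)
      rw [List.getElem?_set, hlen, pvSetFold_getElem?, pvInitPref_length]
      by_cases hi : i < d
      · rw [pvDirectPref_getElem? d [] i hi]
        by_cases hlast : d - 1 = i
        · rw [if_pos hlast, if_pos (by omega)]
          simp [pvOpen, ← hlast]
        · rw [if_neg hlast, if_pos (by omega)]
          simp only [pvOpen, Bool.false_eq_true, if_false]
          rw [if_neg (by omega)]
      · rw [if_neg (by omega), if_neg (by omega),
          List.getElem?_eq_none (by rw [pvInitPref_length]; omega),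
          List.getElem?_eq_none (by rw [pvDirectPref_length]; omega)]
    · have hd0 : d = 0 := by omega
      subst hd0
      rw [if_neg hd, if_neg (by tauto)]
      rfl
  · have hd' : d' ≤ d + 1 := hrel (d', m', t') rfl
    simp only [pvRenderAll, pvFixLine, List.head?_cons, Option.any_some, beq_iff_eq,
      Prod.mk.injEq, true_and, and_true]
    -- abbreviations
    set nxp := pvDirectPref d' r2 with hnxp
    -- final prefix of the next line, looked up
    have hgetD : ∀ j, nxp.getD j "" =
        if j < d' then
          (if j = d' - 1 then (if pvOpen r2 (d' - 1) then "├" else "└")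
           else (if pvOpen r2 j then "│" else " "))
        else "" := by
      intro j
      rw [hnxp, pvDirectPref_getD]
      by_cases h : j < d'
      · rw [dif_pos h, if_pos h]
      · rw [dif_neg h, if_neg h]
    refine List.ext_getElem? (fun i => ?_)
    -- p1 : the range(next_d, d-1) blanking
    have hp1len : (if d' < d then
        (List.range' d' (d - 1 - d')).foldl (fun p j => p.set j " ") (pvInitPref d)
        else pvInitPref d).length = d := by
      split
      · rw [pvSetFold_length, pvInitPref_length]
      · exact pvInitPref_length d
    have hp1 : ∀ i, (if d' < d then
        (List.range' d' (d - 1 - d')).foldl (fun p j => p.set j " ") (pvInitPref d)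
        else pvInitPref d)[i]? =
        if d' < d ∧ d' ≤ i ∧ i < d - 1 then some " " else (pvInitPref d)[i]? := by
      intro i
      by_cases h : d' < d
      · rw [if_pos h, pvSetFold_getElem?, pvInitPref_length]
        by_cases h2 : d' ≤ i ∧ i < d' + (d - 1 - d') ∧ i < d
        · rw [if_pos h2, if_pos ⟨h, by omega, by omega⟩]
        · rw [if_neg h2, if_neg (by omega)]
      · rw [if_neg h, if_neg (by omega)]
    set p1t := (if d' < d then List.foldl (fun p j => p.set j " ") (pvInitPref d)
        (List.range' d' (d - 1 - d')) else pvInitPref d) with hp1t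
    have hp2 : ∀ i, (List.foldl (fun p j => if j < d' ∧ nxp.getD j "" = " " then p.set j " " else p)
        p1t (List.range (d - 1)))[i]? =
        if i < d - 1 ∧ (i < d' ∧ nxp.getD i "" = " ") ∧ i < d then some " " else p1t[i]? := by
      intro i
      rw [pvCopyFold_getElem? (fun j => j < d' ∧ nxp.getD j "" = " "), hp1len]
    have hp2len : (List.foldl (fun p j => if j < d' ∧ nxp.getD j "" = " " then p.set j " " else p)
        p1t (List.range (d - 1))).length = d := by
      rw [pvCopyFold_length (fun j => j < d' ∧ nxp.getD j "" = " "), hp1len]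
    set p2t := List.foldl (fun p j => if j < d' ∧ nxp.getD j "" = " " then p.set j " " else p)
        p1t (List.range (d - 1)) with hp2t
    show (if 0 < d ∧ (d' < d ∨ nxp.getD (d - 1) "" = " ") then p2t.set (d - 1) "└" else p2t)[i]? =
      (pvDirectPref d ((d', m', t') :: r2))[i]?
    have hmid : ∀ i, i < d - 1 → p2t[i]? = some (if pvOpen ((d', m', t') :: r2) i then "│" else " ") := by
      intro i hi
      have hinit : (pvInitPref d)[i]? = some "│" := by
        rw [pvInitPref_getElem? d i (by omega), if_neg (by omega)]
      rw [hp2 i]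
      rcases Nat.lt_or_ge i d' with hlt | hge
      · by_cases heq : i = d' - 1
        · -- d' = i + 1 : next line's char there is its branch mark, never ' '
          have hopen : pvOpen ((d', m', t') :: r2) i = true := by
            simp only [pvOpen]
            rw [if_pos (show d' = i + 1 by omega)]
          have hne : ¬ nxp.getD i "" = " " := by
            rw [hgetD i, if_pos hlt, if_pos heq]
            split <;> decide
          rw [if_neg (fun hc => hne hc.2.1.2), hp1 i, if_neg (by omega), hinit]
          simp [hopen]
        · -- d' > i + 1 : the char is copied from the next line
          have hopen : pvOpen ((d', m', t') :: r2) i = pvOpen r2 i := by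
            simp only [pvOpen]
            rw [if_neg (show ¬ d' = i + 1 by omega), if_neg (show ¬ d' ≤ i by omega)]
          have hval : nxp.getD i "" = (if pvOpen r2 i then "│" else " ") := by
            rw [hgetD i, if_pos hlt, if_neg heq]
          by_cases hop : pvOpen r2 i = true
          · rw [if_neg (fun hc => by rw [hval, if_pos hop] at hc; exact absurd hc.2.1.2 (by decide)),
              hp1 i, if_neg (by omega), hinit]
            simp [hopen, hop]
          · rw [if_pos ⟨hi, ⟨hlt, by rw [hval, if_neg hop]⟩, by omega⟩]
            simp [hopen, hop]
      · -- d' ≤ i : blanked by the range(next_d, d-1) pass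
        have hopen : pvOpen ((d', m', t') :: r2) i = false := by
          simp only [pvOpen]
          rw [if_neg (show ¬ d' = i + 1 by omega), if_pos hge]
        rw [if_neg (fun hc => absurd hc.2.1.1 (by omega)), hp1 i,
          if_pos ⟨by omega, hge, hi⟩]
        simp [hopen]
    by_cases hi : i < d
    · rw [pvDirectPref_getElem? d _ i hi]
      by_cases hlast : i = d - 1
      · -- the branch-mark column
        subst hlast
        have hd0 : 0 < d := by omega
        rw [if_pos rfl]
        have hp2last : p2t[d - 1]? = (pvInitPref d)[d - 1]? := by
          rw [hp2 (d - 1), if_neg (by omega), hp1 (d - 1), if_neg (by omega)]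
        have hinitlast : (pvInitPref d)[d - 1]? = some "├" := by
          rw [pvInitPref_getElem? d (d - 1) (by omega), if_pos rfl]
        by_cases h1 : d' < d
        · -- next line is shallower: '└', and the column is closed
          have hopen : pvOpen ((d', m', t') :: r2) (d - 1) = false := by
            simp only [pvOpen]
            rw [if_neg (show ¬ d' = (d - 1) + 1 by omega), if_pos (by omega)]
          rw [if_pos ⟨hd0, Or.inl h1⟩, List.getElem?_set, hp2len, if_pos rfl, if_pos (by omega)]
          simp [hopen]
        · by_cases h2 : d' = d
          · -- next line is a sibling: its mark is '├'/'└', never ' '; keep '├'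
            have hopen : pvOpen ((d', m', t') :: r2) (d - 1) = true := by
              simp only [pvOpen]
              rw [if_pos (show d' = (d - 1) + 1 by omega)]
            have hne : ¬ nxp.getD (d - 1) "" = " " := by
              rw [hgetD (d - 1), if_pos (by omega), if_pos (by omega)]
              split <;> decide
            rw [if_neg (fun hc => (hc.2.elim (fun h => h1 h) hne)), hp2last, hinitlast]
            simp [hopen]
          · -- d' = d + 1 : next line is a child; copy its openness at d-1
            have hopen : pvOpen ((d', m', t') :: r2) (d - 1) = pvOpen r2 (d - 1) := by
              simp only [pvOpen]
              rw [if_neg (show ¬ d' = (d - 1) + 1 by omega), if_neg (show ¬ d' ≤ d - 1 by omega)]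
            have hval : nxp.getD (d - 1) "" = (if pvOpen r2 (d - 1) then "│" else " ") := by
              rw [hgetD (d - 1), if_pos (by omega), if_neg (by omega)]
            by_cases hop : pvOpen r2 (d - 1) = true
            · rw [if_neg (fun hc => hc.2.elim h1 (fun h => by
                  rw [hval, if_pos hop] at h; exact absurd h (by decide))),
                hp2last, hinitlast]
              simp [hopen, hop]
            · rw [if_pos ⟨hd0, Or.inr (by rw [hval, if_neg hop])⟩,
                List.getElem?_set, hp2len, if_pos rfl, if_pos (by omega)]
              simp [hopen, hop]
      · -- an ancestor column, i < d - 1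
        rw [if_neg hlast]
        have hmid' := hmid i (by omega)
        by_cases hc3 : 0 < d ∧ (d' < d ∨ nxp.getD (d - 1) "" = " ")
        · rw [if_pos hc3, List.getElem?_set, hp2len, if_neg (by omega), hmid']
        · rw [if_neg hc3, hmid']
    · have hLlen : (if 0 < d ∧ (d' < d ∨ nxp.getD (d - 1) "" = " ") then
          p2t.set (d - 1) "└" else p2t).length = d := by
        by_cases hc3 : 0 < d ∧ (d' < d ∨ nxp.getD (d - 1) "" = " ")
        · rw [if_pos hc3, List.length_set, hp2len]
        · rw [if_neg hc3, hp2len]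
      rw [List.getElem?_eq_none (by rw [hLlen]; omega),
        List.getElem?_eq_none (by rw [pvDirectPref_length]; omega)]

theorem pvFixAll_eq : ∀ (ts : List (Nat × Bool × String)), List.IsChain pvStep ts →
    pvFixAll (ts.map pvAddInit) = pvRenderAll ts := by
  intro ts
  induction ts with
  | nil => intro _; rfl
  | cons x rest ih =>
    intro h
    obtain ⟨d, m, t⟩ := x
    have hrel : ∀ y ∈ rest.head?, y.1 ≤ d + 1 := fun y hy => (List.isChain_cons.mp h).1 y hy
    rw [List.map_cons]
    simp only [pvFixAll]
    rw [ih (List.isChain_cons.mp h).2]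
    show pvFixLine (d, pvInitPref d, m, t) (pvRenderAll rest).head? :: pvRenderAll rest = _
    rw [pvFixLine_eq d m t rest hrel]
    rfl

theorem pvGenEq (themes : List (List String)) :
    pvThemesToLines themes =
      ((pvGenTriples themes).1.map pvAddInit, (pvGenTriples themes).2) := by
  unfold pvThemesToLines pvGenTriples
  exact pvGenAux themes [] []

theorem pvGenChain (themes : List (List String)) :
    List.IsChain pvStep (pvGenTriples themes).1 := by
  unfold pvGenTriples
  exact (pvGenChain' themes [] [] (by simp) (by simp)).1

-- ===== VERDICT (by name: the statement is the Claim_ definition above) =====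
theorem render_themes_tree_spec : Claim_equal_render_themes_tree := by
  intro themes _ _
  unfold Spec_render_themes_tree render_themes_tree render_themes_tree_alt
  simp only [show (pvThemesToLines themes).1 = (pvGenTriples themes).1.map pvAddInit by
        rw [pvGenEq],
      pvFixAll_eq _ (pvGenChain themes)]
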